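-- pv_equiv track=rewrite | github.com/bg-93/prosperity-4-forgetful-functors | manual/r1.py | compute_clearing
-- ===== SOURCE A (Python) =====
-- def compute_clearing(bids: dict[int, int], asks: dict[int, int]) -> tuple[int, int]:
--     """
--     Returns:
--         clearing_price, clearing_volume
--     """
--     candidate_prices = sorted(set(bids.keys()) | set(asks.keys()))
--     best_price = None
--     best_volume = -1
--
--     for p in candidate_prices:
--         demand = sum(q for price, q in bids.items() if price >= p)
--         supply = sum(q for price, q in asks.items() if price <= p)
--         traded = min(demand, supply)
--
--         if traded > best_volume or (traded == best_volume and (best_price is None or p > best_price)):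
--             best_volume = traded
--             best_price = p
--
--     if best_price is None:
--         raise ValueError("No candidate prices found")
--
--     return best_price, best_volume
-- ===== SOURCE B (Python) =====
-- def compute_clearing(bids: dict[int, int], asks: dict[int, int]) -> tuple[int, int]:
--     """
--     Returns:
--         clearing_price, clearing_volume
--
--     Single ascending sweep over the sorted candidate prices, maintaining the
--     demand (quantity bid at or above the current price) and supply (quantity
--     asked at or below it) incrementally instead of re-summing per price.
--     """
--     prices = sorted(set(bids) | set(asks))
--     if not prices:
--         raise ValueError("No candidate prices found")
--
--     demand = sum(bids.values())  # demand at the lowest candidate price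
--     supply = 0
--     best_price = prices[0]
--     best_volume = -1
--
--     for p in prices:
--         supply += asks.get(p, 0)
--         traded = min(demand, supply)
--         if traded >= best_volume:  # prices ascend, so ties keep the higher price
--             best_price, best_volume = p, traded
--         demand -= bids.get(p, 0)
--
--     return best_price, best_volume
-- ===== Notes on version B (the rewrite author's own statement) =====
-- stated objective: faster
-- what changed: A recomputes demand and supply by scanning all bids and asks for every candidate price (quadratic); B sorts the candidate prices once and sweeps them in ascending order, maintaining demand and supply as running sums updated per price.
import Mathlib
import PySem

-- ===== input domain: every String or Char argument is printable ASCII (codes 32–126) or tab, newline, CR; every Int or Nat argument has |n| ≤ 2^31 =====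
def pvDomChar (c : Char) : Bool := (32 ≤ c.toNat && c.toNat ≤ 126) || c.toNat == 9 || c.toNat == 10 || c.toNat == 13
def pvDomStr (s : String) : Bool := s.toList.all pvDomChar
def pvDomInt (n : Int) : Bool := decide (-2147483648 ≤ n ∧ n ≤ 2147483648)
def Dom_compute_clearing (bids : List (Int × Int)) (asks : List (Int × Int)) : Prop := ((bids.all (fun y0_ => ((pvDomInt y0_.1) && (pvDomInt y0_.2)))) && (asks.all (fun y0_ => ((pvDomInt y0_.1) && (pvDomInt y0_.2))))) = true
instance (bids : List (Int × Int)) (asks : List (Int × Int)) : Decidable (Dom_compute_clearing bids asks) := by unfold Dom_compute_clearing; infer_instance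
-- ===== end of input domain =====

-- B replaces A's per-candidate re-summation of demand/supply (quadratic) by one ascending sweep
-- with incrementally maintained demand/supply sums over the sorted candidate prices.

-- ===== PORT A =====
-- demand at price p: sum(q for price, q in bids.items() if price >= p)
def pvDemand (bd : PySem.Dict Int Int) (p : Int) : Int :=
  ((bd.items.filter (fun kv => decide (p ≤ kv.1))).map (·.2)).sum

-- supply at price p: sum(q for price, q in asks.items() if price <= p)
def pvSupply (ad : PySem.Dict Int Int) (p : Int) : Int :=
  ((ad.items.filter (fun kv => decide (kv.1 ≤ p))).map (·.2)).sum

-- "best_price is None or p > best_price"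
def prOk (bp : Option Int) (p : Int) : Bool :=
  match bp with
  | none => true
  | some q => decide (q < p)

-- one iteration of A's loop; state = (best_price : Option Int, best_volume)
def stepA (bd ad : PySem.Dict Int Int) (s : Option Int × Int) (p : Int) : Option Int × Int :=
  let demand := pvDemand bd p
  let supply := pvSupply ad p
  let traded := min demand supply
  if decide (traded > s.2) || (decide (traded = s.2) && prOk s.1 p) then (some p, traded) else s

-- A's loop over the candidate prices plus its final return/raise
def runA (bd ad : PySem.Dict Int Int) (candidate_prices : List Int) : Int × Int :=
  let st := candidate_prices.foldl (stepA bd ad) (none, -1)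
  match st.1 with
  | some bp => (bp, st.2)
  | none => (0, 0)   -- Python raises ValueError here; excluded by Pre_compute_clearing

def compute_clearing (bids : List (Int × Int)) (asks : List (Int × Int)) : Int × Int :=
  let bd := PySem.Dict.ofList bids
  let ad := PySem.Dict.ofList asks
  runA bd ad
    (PySem.List.sorted (PySem.Set.union (PySem.Set.ofList (PySem.Dict.keys bd)) (PySem.Dict.keys ad)) (fun x => x) false)

-- ===== PORT B =====
-- one iteration of B's loop; state = (demand, supply, best_price, best_volume)
def stepB (bd ad : PySem.Dict Int Int) (s : Int × Int × Int × Int) (p : Int) : Int × Int × Int × Int :=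
  let supply := s.2.1 + ad.getD p 0
  let traded := min s.1 supply
  if traded ≥ s.2.2.2 then (s.1 - bd.getD p 0, supply, p, traded)
  else (s.1 - bd.getD p 0, supply, s.2.2.1, s.2.2.2)

-- B's guard, sweep and return
def runB (bd ad : PySem.Dict Int Int) (prices : List Int) : Int × Int :=
  match prices with
  | [] => (0, 0)     -- Python raises ValueError here; excluded by Pre_compute_clearing
  | p0 :: _ =>
    let st := prices.foldl (stepB bd ad) ((PySem.Dict.values bd).sum, 0, p0, -1)
    (st.2.2.1, st.2.2.2)

def compute_clearing_alt (bids : List (Int × Int)) (asks : List (Int × Int)) : Int × Int :=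
  let bd := PySem.Dict.ofList bids
  let ad := PySem.Dict.ofList asks
  runB bd ad
    (PySem.List.sorted (PySem.Set.union (PySem.Set.ofList (PySem.Dict.keys bd)) (PySem.Dict.keys ad)) (fun x => x) false)

-- ===== PRECONDITION & SPEC =====
-- Pre_ is exactly where A returns: A raises ValueError iff no candidate price clears volume ≥ -1
-- (in particular it holds whenever the books are not both empty and all quantities are nonnegative).
def Pre_compute_clearing (bids : List (Int × Int)) (asks : List (Int × Int)) : Prop :=
  ∃ p ∈ PySem.Dict.keys (PySem.Dict.ofList bids) ++ PySem.Dict.keys (PySem.Dict.ofList asks),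
    -1 ≤ min (pvDemand (PySem.Dict.ofList bids) p) (pvSupply (PySem.Dict.ofList asks) p)
instance (bids : List (Int × Int)) (asks : List (Int × Int)) : Decidable (Pre_compute_clearing bids asks) := by
  unfold Pre_compute_clearing; infer_instance

def pvWitness_compute_clearing : (List (Int × Int)) × (List (Int × Int)) := ([(10, 3)], [(9, 2)])

def Spec_compute_clearing (bids : List (Int × Int)) (asks : List (Int × Int)) (out : Int × Int) : Prop := out = compute_clearing_alt bids asks
instance (bids : List (Int × Int)) (asks : List (Int × Int)) (out : Int × Int) : Decidable (Spec_compute_clearing bids asks out) := by unfold Spec_compute_clearing; infer_instance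

-- ===== CLAIM (what is proved, stated in full; the proofs are below) =====
def Claim_equal_compute_clearing : Prop := ∀ (bids : List (Int × Int)) (asks : List (Int × Int)), Dom_compute_clearing bids asks → Pre_compute_clearing bids asks → Spec_compute_clearing bids asks (compute_clearing bids asks)

-- ===== LEMMAS AND PROOFS =====

-- the quantity stored under key p in a Nodup-keyed dict is the sum of the values at key p
lemma getD_eq_sum_filter_list (l : List (Int × Int)) (hnd : (l.map (·.1)).Nodup) (p : Int) :
    (PySem.Dict.mk l).getD p 0 = ((l.filter (fun kv => kv.1 == p)).map (·.2)).sum := by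
  induction l with
  | nil => simp [PySem.Dict.getD, PySem.Dict.get?]
  | cons kv rest ih =>
    obtain ⟨k, v⟩ := kv
    simp only [List.map_cons, List.nodup_cons] at hnd
    rw [PySem.Dict.getD_eq_get?_getD, PySem.Dict.get?_mk_cons]
    by_cases hk : k = p
    · subst hk
      have hnone : (rest.filter (fun kv => kv.1 == k)) = [] := by
        apply List.filter_eq_nil_iff.2
        intro a ha h
        simp only [beq_iff_eq] at h
        exact hnd.1 (List.mem_map.2 ⟨a, ha, h⟩)
      simp [hnone]
    · have hb : (k == p) = false := by simp [hk]
      have hf : ((⟨k, v⟩ :: rest).filter (fun kv => kv.1 == p)) = rest.filter (fun kv => kv.1 == p) :=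
        List.filter_cons_of_neg (by simp [hk])
      rw [hf, hb]
      simp only [Bool.false_eq_true, if_false]
      rw [← PySem.Dict.getD_eq_get?_getD]
      exact ih hnd.2

lemma getD_eq_sum_filter (d : PySem.Dict Int Int) (hnd : (PySem.Dict.keys d).Nodup) (p : Int) :
    d.getD p 0 = ((d.items.filter (fun kv => kv.1 == p)).map (·.2)).sum := by
  obtain ⟨l⟩ := d
  exact getD_eq_sum_filter_list l hnd p

-- removing key p from the "not yet processed" filter subtracts the values at key p
lemma sum_split_not_mem (l : List (Int × Int)) (done : List Int) (p : Int) (hp : p ∉ done) :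
    ((l.filter (fun kv => !decide (kv.1 ∈ done ++ [p]))).map (·.2)).sum
      = ((l.filter (fun kv => !decide (kv.1 ∈ done))).map (·.2)).sum
        - ((l.filter (fun kv => kv.1 == p)).map (·.2)).sum := by
  induction l with
  | nil => simp
  | cons kv rest ih =>
    by_cases hkp : kv.1 = p
    · have f1 : ((kv :: rest).filter (fun kv => !decide (kv.1 ∈ done ++ [p])))
          = rest.filter (fun kv => !decide (kv.1 ∈ done ++ [p])) :=
        List.filter_cons_of_neg (by simp [hkp])
      have f2 : ((kv :: rest).filter (fun kv => !decide (kv.1 ∈ done)))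
          = kv :: rest.filter (fun kv => !decide (kv.1 ∈ done)) :=
        List.filter_cons_of_pos (by simp [hkp ▸ hp])
      have f3 : ((kv :: rest).filter (fun kv => kv.1 == p))
          = kv :: rest.filter (fun kv => kv.1 == p) :=
        List.filter_cons_of_pos (by simp [hkp])
      rw [f1, f2, f3]
      simp only [List.map_cons, List.sum_cons]
      rw [ih]
      omega
    · by_cases hkd : kv.1 ∈ done
      · have f1 : ((kv :: rest).filter (fun kv => !decide (kv.1 ∈ done ++ [p])))
            = rest.filter (fun kv => !decide (kv.1 ∈ done ++ [p])) :=
          List.filter_cons_of_neg (by simp [hkd])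
        have f2 : ((kv :: rest).filter (fun kv => !decide (kv.1 ∈ done)))
            = rest.filter (fun kv => !decide (kv.1 ∈ done)) :=
          List.filter_cons_of_neg (by simp [hkd])
        have f3 : ((kv :: rest).filter (fun kv => kv.1 == p))
            = rest.filter (fun kv => kv.1 == p) :=
          List.filter_cons_of_neg (by simp [hkp])
        rw [f1, f2, f3]
        exact ih
      · have f1 : ((kv :: rest).filter (fun kv => !decide (kv.1 ∈ done ++ [p])))
            = kv :: rest.filter (fun kv => !decide (kv.1 ∈ done ++ [p])) :=
          List.filter_cons_of_pos (by simp [hkd, hkp])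
        have f2 : ((kv :: rest).filter (fun kv => !decide (kv.1 ∈ done)))
            = kv :: rest.filter (fun kv => !decide (kv.1 ∈ done)) :=
          List.filter_cons_of_pos (by simp [hkd])
        have f3 : ((kv :: rest).filter (fun kv => kv.1 == p))
            = rest.filter (fun kv => kv.1 == p) :=
          List.filter_cons_of_neg (by simp [hkp])
        rw [f1, f2, f3]
        simp only [List.map_cons, List.sum_cons]
        rw [ih]
        omega

-- adding key p to the "processed" filter adds the values at key p
lemma sum_split_mem (l : List (Int × Int)) (done : List Int) (p : Int) (hp : p ∉ done) :
    ((l.filter (fun kv => decide (kv.1 ∈ done ++ [p]))).map (·.2)).sum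
      = ((l.filter (fun kv => decide (kv.1 ∈ done))).map (·.2)).sum
        + ((l.filter (fun kv => kv.1 == p)).map (·.2)).sum := by
  induction l with
  | nil => simp
  | cons kv rest ih =>
    by_cases hkp : kv.1 = p
    · have f1 : ((kv :: rest).filter (fun kv => decide (kv.1 ∈ done ++ [p])))
          = kv :: rest.filter (fun kv => decide (kv.1 ∈ done ++ [p])) :=
        List.filter_cons_of_pos (by simp [hkp])
      have f2 : ((kv :: rest).filter (fun kv => decide (kv.1 ∈ done)))
          = rest.filter (fun kv => decide (kv.1 ∈ done)) :=
        List.filter_cons_of_neg (by simp [hkp ▸ hp])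
      have f3 : ((kv :: rest).filter (fun kv => kv.1 == p))
          = kv :: rest.filter (fun kv => kv.1 == p) :=
        List.filter_cons_of_pos (by simp [hkp])
      rw [f1, f2, f3]
      simp only [List.map_cons, List.sum_cons]
      rw [ih]
      omega
    · by_cases hkd : kv.1 ∈ done
      · have f1 : ((kv :: rest).filter (fun kv => decide (kv.1 ∈ done ++ [p])))
            = kv :: rest.filter (fun kv => decide (kv.1 ∈ done ++ [p])) :=
          List.filter_cons_of_pos (by simp [hkd])
        have f2 : ((kv :: rest).filter (fun kv => decide (kv.1 ∈ done)))
            = kv :: rest.filter (fun kv => decide (kv.1 ∈ done)) :=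
          List.filter_cons_of_pos (by simp [hkd])
        have f3 : ((kv :: rest).filter (fun kv => kv.1 == p))
            = rest.filter (fun kv => kv.1 == p) :=
          List.filter_cons_of_neg (by simp [hkp])
        rw [f1, f2, f3]
        simp only [List.map_cons, List.sum_cons]
        rw [ih]
        omega
      · have f1 : ((kv :: rest).filter (fun kv => decide (kv.1 ∈ done ++ [p])))
            = rest.filter (fun kv => decide (kv.1 ∈ done ++ [p])) :=
          List.filter_cons_of_neg (by simp [hkd, hkp])
        have f2 : ((kv :: rest).filter (fun kv => decide (kv.1 ∈ done)))
            = rest.filter (fun kv => decide (kv.1 ∈ done)) :=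
          List.filter_cons_of_neg (by simp [hkd])
        have f3 : ((kv :: rest).filter (fun kv => kv.1 == p))
            = rest.filter (fun kv => kv.1 == p) :=
          List.filter_cons_of_neg (by simp [hkp])
        rw [f1, f2, f3]
        exact ih

-- main loop invariant: A's fold and B's fold stay in lockstep over the sorted candidate prices
lemma fold_equiv (bd ad : PySem.Dict Int Int)
    (hb : (PySem.Dict.keys bd).Nodup) (ha : (PySem.Dict.keys ad).Nodup) :
    ∀ (l done : List Int), (done ++ l).Pairwise (· < ·) →
    (∀ k ∈ PySem.Dict.keys bd, k ∈ done ++ l) →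
    (∀ k ∈ PySem.Dict.keys ad, k ∈ done ++ l) →
    ∀ (bpA : Option Int) (bpB bv : Int),
    (∀ q, bpA = some q → q ∈ done ∧ q = bpB) →
    (l.foldl (stepA bd ad) (bpA, bv)).2
        = (l.foldl (stepB bd ad)
            (((bd.items.filter (fun kv => !decide (kv.1 ∈ done))).map (·.2)).sum,
             ((ad.items.filter (fun kv => decide (kv.1 ∈ done))).map (·.2)).sum,
             bpB, bv)).2.2.2
    ∧ (∀ q, (l.foldl (stepA bd ad) (bpA, bv)).1 = some q →
          q = (l.foldl (stepB bd ad)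
            (((bd.items.filter (fun kv => !decide (kv.1 ∈ done))).map (·.2)).sum,
             ((ad.items.filter (fun kv => decide (kv.1 ∈ done))).map (·.2)).sum,
             bpB, bv)).2.2.1)
    ∧ ((l.foldl (stepA bd ad) (bpA, bv)).1 = none →
          bpA = none ∧ (l.foldl (stepA bd ad) (bpA, bv)).2 = bv
          ∧ ∀ p ∈ l, min (pvDemand bd p) (pvSupply ad p) < bv) := by
  intro l
  induction l with
  | nil =>
    intro done _ _ _ bpA bpB bv hinv
    refine ⟨rfl, ?_, ?_⟩
    · intro q hq; exact (hinv q hq).2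
    · intro h; exact ⟨h, rfl, by simp⟩
  | cons p rest ih =>
    intro done hpw hkb hka bpA bpB bv hinv
    -- order facts
    have hpw' : (done ++ p :: rest).Pairwise (· < ·) := hpw
    have hdlt : ∀ k ∈ done, k < p := by
      intro k hk
      have := (List.pairwise_append.1 hpw').2.2 k hk p (by simp)
      exact this
    have hrgt : ∀ k ∈ rest, p < k := by
      have := ((List.pairwise_append.1 hpw').2.1)
      intro k hk
      exact List.rel_of_pairwise_cons this hk
    have hpnd : p ∉ done := fun h => lt_irrefl p (hdlt p h)
    -- carried demand equals pvDemand at p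
    have hdem : ((bd.items.filter (fun kv => !decide (kv.1 ∈ done))).map (·.2)).sum = pvDemand bd p := by
      unfold pvDemand
      congr 1
      congr 1
      apply List.filter_congr
      intro kv hkv
      have hkmem : kv.1 ∈ done ++ p :: rest := hkb kv.1 (PySem.Dict.mem_keys_of_mem_items _ hkv)
      by_cases hd : kv.1 ∈ done
      · have : kv.1 < p := hdlt _ hd
        simp [hd, not_le.2 this]
      · have : kv.1 ∈ p :: rest := by
          rcases List.mem_append.1 hkmem with h | h
          · exact absurd h hd
          · exact h
        have hle : p ≤ kv.1 := by
          rcases List.mem_cons.1 this with h | h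
          · exact le_of_eq h.symm
          · exact le_of_lt (hrgt _ h)
        simp [hd, hle]
    -- updated supply equals pvSupply at p
    have hsup : ((ad.items.filter (fun kv => decide (kv.1 ∈ done))).map (·.2)).sum + ad.getD p 0
        = pvSupply ad p := by
      rw [getD_eq_sum_filter ad ha p, ← sum_split_mem ad.items done p hpnd]
      unfold pvSupply
      congr 1
      congr 1
      apply List.filter_congr
      intro kv hkv
      have hkmem : kv.1 ∈ done ++ p :: rest := hka kv.1 (PySem.Dict.mem_keys_of_mem_items _ hkv)
      by_cases hd : kv.1 ∈ done ++ [p]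
      · have : kv.1 ≤ p := by
          rcases List.mem_append.1 hd with h | h
          · exact le_of_lt (hdlt _ h)
          · simp at h; omega
        simp [hd, this]
      · have h1 : kv.1 ∉ done := fun h => hd (by simp [h])
        have h2 : kv.1 ≠ p := fun h => hd (by simp [h])
        have : kv.1 ∈ p :: rest := by
          rcases List.mem_append.1 hkmem with h | h
          · exact absurd h h1
          · exact h
        have hgt : p < kv.1 := by
          rcases List.mem_cons.1 this with h | h
          · exact absurd h h2
          · exact hrgt _ h
        simp [hd, not_le.2 hgt]
    -- updated demand matches the invariant at done ++ [p]
    have hdem' : ((bd.items.filter (fun kv => !decide (kv.1 ∈ done))).map (·.2)).sum - bd.getD p 0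
        = ((bd.items.filter (fun kv => !decide (kv.1 ∈ done ++ [p]))).map (·.2)).sum := by
      rw [getD_eq_sum_filter bd hb p, sum_split_not_mem bd.items done p hpnd]
    -- supply bookkeeping for done ++ [p]
    have hsup' : ((ad.items.filter (fun kv => decide (kv.1 ∈ done))).map (·.2)).sum + ad.getD p 0
        = ((ad.items.filter (fun kv => decide (kv.1 ∈ done ++ [p]))).map (·.2)).sum := by
      rw [getD_eq_sum_filter ad ha p, sum_split_mem ad.items done p hpnd]
    -- the two step conditions coincide
    have htraded : min ((bd.items.filter (fun kv => !decide (kv.1 ∈ done))).map (·.2)).sum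
        (((ad.items.filter (fun kv => decide (kv.1 ∈ done))).map (·.2)).sum + ad.getD p 0)
        = min (pvDemand bd p) (pvSupply ad p) := by rw [hdem, hsup]
    have htr2 : min ((bd.items.filter (fun kv => !decide (kv.1 ∈ done))).map (·.2)).sum
        ((ad.items.filter (fun kv => decide (kv.1 ∈ done ++ [p]))).map (·.2)).sum
        = min (pvDemand bd p) (pvSupply ad p) := by rw [← hsup']; exact htraded
    have hpw2 : ((done ++ [p]) ++ rest).Pairwise (· < ·) := by
      simpa [List.append_assoc] using hpw'
    have hkb2 : ∀ k ∈ PySem.Dict.keys bd, k ∈ (done ++ [p]) ++ rest := by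
      intro k hk; simpa [List.append_assoc] using hkb k hk
    have hka2 : ∀ k ∈ PySem.Dict.keys ad, k ∈ (done ++ [p]) ++ rest := by
      intro k hk; simpa [List.append_assoc] using hka k hk
    -- case on whether the update fires
    by_cases hup : min (pvDemand bd p) (pvSupply ad p) ≥ bv
    · -- both update
      have hmatch : prOk bpA p = true := by
        cases bpA with
        | none => rfl
        | some q => simp [prOk, hdlt q (hinv q rfl).1]
      have hA : stepA bd ad (bpA, bv) p = (some p, min (pvDemand bd p) (pvSupply ad p)) := by
        unfold stepA
        have hcond : (decide (min (pvDemand bd p) (pvSupply ad p) > bv) ||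
            (decide (min (pvDemand bd p) (pvSupply ad p) = bv) && prOk bpA p)) = true := by
          rcases lt_or_eq_of_le hup with h | h
          · simp [h]
          · simp [h.symm, hmatch]
        simp only [hcond]
        simp
      have hB : stepB bd ad (((bd.items.filter (fun kv => !decide (kv.1 ∈ done))).map (·.2)).sum,
             ((ad.items.filter (fun kv => decide (kv.1 ∈ done))).map (·.2)).sum, bpB, bv) p
          = (((bd.items.filter (fun kv => !decide (kv.1 ∈ done ++ [p]))).map (·.2)).sum,
             ((ad.items.filter (fun kv => decide (kv.1 ∈ done ++ [p]))).map (·.2)).sum,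
             p, min (pvDemand bd p) (pvSupply ad p)) := by
        unfold stepB
        simp only [hsup', hdem']
        rw [htr2, if_pos hup]
      simp only [List.foldl_cons, hA, hB]
      have := ih (done ++ [p]) hpw2 hkb2 hka2 (some p) p
        (min (pvDemand bd p) (pvSupply ad p))
        (by intro q hq; cases hq; exact ⟨by simp, rfl⟩)
      refine ⟨this.1, this.2.1, ?_⟩
      intro hnone
      exact absurd ((this.2.2 hnone).1) (by simp)
    · -- neither updates
      rw [not_le] at hup
      have hA : stepA bd ad (bpA, bv) p = (bpA, bv) := by
        unfold stepA
        have h1 : ¬ min (pvDemand bd p) (pvSupply ad p) > bv := by omega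
        have h2 : ¬ min (pvDemand bd p) (pvSupply ad p) = bv := by omega
        simp only [h1, h2]
        simp
      have hB : stepB bd ad (((bd.items.filter (fun kv => !decide (kv.1 ∈ done))).map (·.2)).sum,
             ((ad.items.filter (fun kv => decide (kv.1 ∈ done))).map (·.2)).sum, bpB, bv) p
          = (((bd.items.filter (fun kv => !decide (kv.1 ∈ done ++ [p]))).map (·.2)).sum,
             ((ad.items.filter (fun kv => decide (kv.1 ∈ done ++ [p]))).map (·.2)).sum,
             bpB, bv) := by
        unfold stepB
        simp only [hsup', hdem']
        rw [htr2, if_neg (by omega)]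
      simp only [List.foldl_cons, hA, hB]
      have := ih (done ++ [p]) hpw2 hkb2 hka2 bpA bpB bv
        (by intro q hq; exact ⟨by simp [(hinv q hq).1], (hinv q hq).2⟩)
      refine ⟨this.1, this.2.1, ?_⟩
      intro hnone
      obtain ⟨h1, h2, h3⟩ := this.2.2 hnone
      refine ⟨h1, h2, ?_⟩
      intro x hx
      rcases List.mem_cons.1 hx with h | h
      · subst h; exact hup
      · exact h3 x h

-- assembling: on a strictly increasing candidate list containing every key, A's run equals B's run
lemma run_equiv (bd ad : PySem.Dict Int Int)
    (hbnd : (PySem.Dict.keys bd).Nodup) (hand : (PySem.Dict.keys ad).Nodup)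
    (prices : List Int) (hpw : prices.Pairwise (· < ·))
    (hkb : ∀ k ∈ PySem.Dict.keys bd, k ∈ prices)
    (hka : ∀ k ∈ PySem.Dict.keys ad, k ∈ prices)
    (hwit : ∃ w ∈ prices, -1 ≤ min (pvDemand bd w) (pvSupply ad w)) :
    runA bd ad prices = runB bd ad prices := by
  obtain ⟨w, hwP, hwmin⟩ := hwit
  obtain ⟨p0, restp, hps⟩ : ∃ a l, prices = a :: l := by
    cases prices with
    | nil => cases hwP
    | cons a l => exact ⟨a, l, rfl⟩
  subst hps
  have key := fold_equiv bd ad hbnd hand (p0 :: restp) [] (by simpa using hpw)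
    (by simpa using hkb) (by simpa using hka) none p0 (-1) (by intro q hq; cases hq)
  have hinit_d : (((bd.items.filter (fun kv => !decide (kv.1 ∈ ([] : List Int)))).map (·.2)).sum)
      = (PySem.Dict.values bd).sum := by
    simp [PySem.Dict.values]
  have hinit_s : (((ad.items.filter (fun kv => decide (kv.1 ∈ ([] : List Int)))).map (·.2)).sum)
      = (0 : Int) := by simp
  rw [hinit_d, hinit_s] at key
  obtain ⟨hbv, hsome, hnone⟩ := key
  cases hA1 : ((p0 :: restp).foldl (stepA bd ad) (none, -1)).1 with
  | none =>
    exfalso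
    have hall := (hnone hA1).2.2 w hwP
    linarith
  | some q =>
    simp only [runA, runB, hA1]
    rw [hsome q hA1, hbv]

-- ===== VERDICT (by name: the statement is the Claim_ definition above) =====
theorem compute_clearing_spec : Claim_equal_compute_clearing := by
  intro bids asks _ hpre
  unfold Spec_compute_clearing
  simp only [compute_clearing, compute_clearing_alt]
  apply run_equiv
  · exact PySem.Dict.nodup_keys_ofList bids
  · exact PySem.Dict.nodup_keys_ofList asks
  · -- sorted distinct candidates are strictly increasing
    have hU : (PySem.Set.union (PySem.Set.ofList (PySem.Dict.keys (PySem.Dict.ofList bids))) (PySem.Dict.keys (PySem.Dict.ofList asks))).Nodup :=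
      PySem.Set.nodup_union _ _ (PySem.Set.nodup_ofList _)
    have hperm := PySem.List.sorted_perm
      (xs := PySem.Set.union (PySem.Set.ofList (PySem.Dict.keys (PySem.Dict.ofList bids))) (PySem.Dict.keys (PySem.Dict.ofList asks)))
      (key := fun x : Int => x) (rev := false)
    have hnd := hperm.symm.nodup hU
    have hle : (PySem.List.sorted (PySem.Set.union (PySem.Set.ofList (PySem.Dict.keys (PySem.Dict.ofList bids))) (PySem.Dict.keys (PySem.Dict.ofList asks))) (fun x : Int => x) false).Pairwise (fun a b : Int => a ≤ b) := by
      simpa using PySem.List.sorted_pairwise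
        (xs := PySem.Set.union (PySem.Set.ofList (PySem.Dict.keys (PySem.Dict.ofList bids))) (PySem.Dict.keys (PySem.Dict.ofList asks)))
        (key := fun x : Int => x)
    exact (hle.and hnd).imp (fun h => lt_of_le_of_ne h.1 h.2)
  · intro k hk
    rw [PySem.List.mem_sorted, PySem.Set.mem_union, PySem.Set.mem_ofList]
    exact Or.inl hk
  · intro k hk
    rw [PySem.List.mem_sorted, PySem.Set.mem_union, PySem.Set.mem_ofList]
    exact Or.inr hk
  · obtain ⟨w, hw, hwmin⟩ := hpre
    refine ⟨w, ?_, hwmin⟩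
    rw [PySem.List.mem_sorted, PySem.Set.mem_union, PySem.Set.mem_ofList]
    rcases List.mem_append.1 hw with h | h
    · exact Or.inl h
    · exact Or.inr h
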